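-- pv_equiv track=rewrite | github.com/IslamIbrahimAIM/crm_data_warehouse | generate_silver_ddl.py | parse_bronze_profiling
-- ===== SOURCE A (Python) =====
-- def parse_bronze_profiling(md_text: str) -> dict:
--     tables = {}
--     current_table = None
--
--     for raw in md_text.splitlines():
--         line = raw.strip()
--
--         if line.startswith("DISCOVERING TABLE:"):
--             current_table = line.split("DISCOVERING TABLE:")[1].strip()
--             tables[current_table] = []
--             continue
--
--         if current_table and line.startswith("|--"):
--             col = line.split(":")[0].replace("|--", "").strip()
--             tables[current_table].append(col)
--
--     return tables
-- ===== SOURCE B (Python) =====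
-- HEADER = "DISCOVERING TABLE:"
--
--
-- def _split_section(lines):
--     """Split lines into (lines before the next header, remainder from that header)."""
--     for k, l in enumerate(lines):
--         if l.startswith(HEADER):
--             return lines[:k], lines[k:]
--     return lines, []
--
--
-- def _columns(section):
--     return [l.split(":")[0].replace("|--", "").strip()
--             for l in section if l.startswith("|--")]
--
--
-- def parse_bronze_profiling(md_text: str) -> dict:
--     lines = [raw.strip() for raw in md_text.splitlines()]
--     tables = {}
--     while lines:
--         head, lines = lines[0], lines[1:]
--         if head.startswith(HEADER):
--             name = head.split(HEADER)[1].strip()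
--             section, lines = _split_section(lines)
--             tables[name] = _columns(section)
--     return tables
-- ===== Notes on version B (the rewrite author's own statement) =====
-- stated objective: alternative
-- what changed: Replaces A's single stateful line loop (current-table flag mutated across iterations) by a two-level decomposition — partition the stripped lines into per-header sections, then map each section to its column list with a comprehension; Pre_ excludes inputs where a 'DISCOVERING TABLE:' header carries an empty table name, a malformed corner on which A's falsy-name test drops the section's columns while B records them under the empty name.
-- outside the precondition, e.g. on parse_bronze_profiling('DISCOVERING TABLE:\n|-- x: int'): A returns {'': []}, B returns {'': ['x']}; on parse_bronze_profiling('DISCOVERING TABLE:'): A returns {'': []}, B returns {'': []}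
import Mathlib
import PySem

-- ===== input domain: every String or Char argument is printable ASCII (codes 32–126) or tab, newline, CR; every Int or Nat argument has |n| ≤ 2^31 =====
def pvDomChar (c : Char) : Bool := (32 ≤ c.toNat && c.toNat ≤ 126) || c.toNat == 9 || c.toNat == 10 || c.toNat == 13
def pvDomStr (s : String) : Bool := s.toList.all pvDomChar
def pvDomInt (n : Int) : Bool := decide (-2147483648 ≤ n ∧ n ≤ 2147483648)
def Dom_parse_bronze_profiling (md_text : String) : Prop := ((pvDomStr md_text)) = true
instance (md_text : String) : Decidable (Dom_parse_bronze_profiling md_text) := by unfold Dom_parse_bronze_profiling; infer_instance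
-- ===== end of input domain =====

-- B replaces A's stateful line loop by partitioning the lines into per-header sections
-- and mapping each section to its column list (objective: alternative decomposition);
-- inputs with an empty-name header are excluded by Pre_ (see its comment).

-- ===== PORT A =====

-- col = line.split(":")[0].replace("|--", "").strip()   (split(":") is never empty, so [0] is its head)
def pvColOf (line : String) : String :=
  PySem.Str.strip (PySem.Str.replace (((PySem.Str.split? line ":").getD []).getD 0 "") "|--" "")

-- line.split("DISCOVERING TABLE:")[1].strip() ; index 1 exists because the line starts with the separator
def pvNameOf (line : String) : String :=
  PySem.Str.strip (((PySem.Str.split? line "DISCOVERING TABLE:").getD []).getD 1 "")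

-- one iteration of A's loop; state = (tables, current_table)
def pvAStep (st : PySem.Dict String (List String) × Option String) (raw : String) :
    PySem.Dict String (List String) × Option String :=
  let line := PySem.Str.strip raw
  if PySem.Str.startswith line "DISCOVERING TABLE:" then
    let name := pvNameOf line
    (st.1.insert name [], some name)
  else
    match st.2 with
    | some t =>
        -- `current_table and …`: a current table "" is falsy in Python
        if t ≠ "" ∧ PySem.Str.startswith line "|--" = true then
          (st.1.modify t [] (fun cs => cs ++ [pvColOf line]), st.2)
        else st
    | none => st

def parse_bronze_profiling (md_text : String) : List (String × List String) :=
  (((PySem.Str.splitlines md_text).foldl pvAStep (PySem.Dict.empty, none)).1).items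

-- ===== PORT B =====

def pvIsHeader (l : String) : Bool := PySem.Str.startswith l "DISCOVERING TABLE:"

-- _split_section: lines before the next header / remainder from that header
-- (ported as takeWhile/dropWhile, which compute exactly lines[:k] / lines[k:])
def pvSplitSection (lines : List String) : List String × List String :=
  (lines.takeWhile (fun l => !pvIsHeader l), lines.dropWhile (fun l => !pvIsHeader l))

-- _columns: comprehension over the '|--' lines of a section
def pvColumns (sect : List String) : List String :=
  (sect.filter (fun l => PySem.Str.startswith l "|--")).map pvColOf

-- the while-loop of B, consuming the (already stripped) line list
def pvBGo (tables : PySem.Dict String (List String)) (lines : List String) :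
    PySem.Dict String (List String) :=
  match lines with
  | [] => tables
  | head :: rest =>
    if pvIsHeader head then
      pvBGo (tables.insert (pvNameOf head) (pvColumns (pvSplitSection rest).1))
        (pvSplitSection rest).2
    else pvBGo tables rest
termination_by lines.length
decreasing_by
  · simp only [pvSplitSection]
    have := (List.dropWhile_sublist (l := rest) (p := fun l => !pvIsHeader l)).length_le
    simp only [List.length_cons]; omega
  · simp

def parse_bronze_profiling_alt (md_text : String) : List (String × List String) :=
  (pvBGo PySem.Dict.empty ((PySem.Str.splitlines md_text).map PySem.Str.strip)).items

-- ===== PRECONDITION & SPEC =====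

-- Pre_ excludes inputs where a 'DISCOVERING TABLE:' header carries an empty table name:
-- a nameless table is malformed profiling input, and whether its column lines are dropped
-- (A's falsy-name test) or recorded under the empty name (B) is an unspecified corner.
def Pre_parse_bronze_profiling (md_text : String) : Prop :=
  ∀ l ∈ (PySem.Str.splitlines md_text).map PySem.Str.strip,
    PySem.Str.startswith l "DISCOVERING TABLE:" → pvNameOf l ≠ ""
instance (md_text : String) : Decidable (Pre_parse_bronze_profiling md_text) := by
  unfold Pre_parse_bronze_profiling; infer_instance

def pvWitness_parse_bronze_profiling : String := "DISCOVERING TABLE: t\n|-- x: int"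

def Spec_parse_bronze_profiling (md_text : String) (out : List (String × List String)) : Prop := out = parse_bronze_profiling_alt md_text
instance (md_text : String) (out : List (String × List String)) : Decidable (Spec_parse_bronze_profiling md_text out) := by unfold Spec_parse_bronze_profiling; infer_instance

-- ===== CLAIM (what is proved, stated in full; the proofs are below) =====
def Claim_equal_parse_bronze_profiling : Prop := ∀ (md_text : String), Dom_parse_bronze_profiling md_text → Pre_parse_bronze_profiling md_text → Spec_parse_bronze_profiling md_text (parse_bronze_profiling md_text)

-- ===== LEMMAS AND PROOFS =====

-- A's step on an already-stripped line (B pre-strips; bridge via List.foldl_map)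
def pvAStep' (st : PySem.Dict String (List String) × Option String) (line : String) :
    PySem.Dict String (List String) × Option String :=
  if PySem.Str.startswith line "DISCOVERING TABLE:" then
    (st.1.insert (pvNameOf line) [], some (pvNameOf line))
  else
    match st.2 with
    | some t =>
        if t ≠ "" ∧ PySem.Str.startswith line "|--" = true then
          (st.1.modify t [] (fun cs => cs ++ [pvColOf line]), st.2)
        else st
    | none => st

-- proof-side scan of the stripped lines: fires only when some empty-name header's
-- section contains a '|--' line (never, under Pre_parse_bronze_profiling)
def pvDScan : List String → Bool → Bool
  | [], _ => false
  | l :: rest, inEmpty =>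
    if PySem.Str.startswith l "DISCOVERING TABLE:" then pvDScan rest (pvNameOf l == "")
    else if inEmpty && PySem.Str.startswith l "|--" then true
    else pvDScan rest inEmpty

-- with no empty-name header the scan never arms and stays false
theorem pvScan_noEmpty (ls : List String)
    (h : ∀ l ∈ ls, PySem.Str.startswith l "DISCOVERING TABLE:" → pvNameOf l ≠ "") :
    pvDScan ls false = false := by
  induction ls with
  | nil => rfl
  | cons l rest ih =>
      have hrest : ∀ x ∈ rest, PySem.Str.startswith x "DISCOVERING TABLE:" → pvNameOf x ≠ "" :=
        fun x hx => h x (by simp [hx])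
      by_cases hh : PySem.Str.startswith l "DISCOVERING TABLE:" = true
      · have hn : (pvNameOf l == "") = false := by
          simpa using h l (by simp) hh
        simp only [pvDScan, hh, if_true, hn]
        exact ih hrest
      · have hh0 : PySem.Str.startswith l "DISCOVERING TABLE:" = false := by
          simpa using hh
        simp only [pvDScan, hh0, Bool.false_eq_true, if_false, Bool.false_and]
        exact ih hrest

-- modify on a key just inserted rewrites its value in place
theorem pvModify_insert (d : PySem.Dict String (List String)) (k : String)
    (v d0 : List String) (f : List String → List String) :
    (d.insert k v).modify k d0 f = d.insert k (f v) := by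
  simp only [PySem.Dict.modify, PySem.Dict.getD_insert_self, PySem.Dict.insert_insert_self]

-- running A's loop through a header-free section with current table name ≠ "" appends that
-- section's columns to the entry of name
theorem pvSection_fold (sect : List String) (hs : ∀ l ∈ sect, pvIsHeader l = false)
    (d : PySem.Dict String (List String)) (name : String) (hn : name ≠ "") (cols : List String) :
    sect.foldl pvAStep' (d.insert name cols, some name)
      = (d.insert name (cols ++ pvColumns sect), some name) := by
  induction sect generalizing cols with
  | nil => simp [pvColumns]
  | cons l rest ih =>
      have hl : PySem.Str.startswith l "DISCOVERING TABLE:" = false := hs l (by simp)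
      have hrest : ∀ x ∈ rest, pvIsHeader x = false := fun x hx => hs x (by simp [hx])
      rw [List.foldl_cons]
      by_cases hc : PySem.Str.startswith l "|--" = true
      · have hstep : pvAStep' (d.insert name cols, some name) l
            = (d.insert name (cols ++ [pvColOf l]), some name) := by
          simp only [pvAStep', hl, Bool.false_eq_true, if_false]
          rw [if_pos ⟨hn, hc⟩, pvModify_insert]
        rw [hstep, ih hrest]
        have hc' : (fun l => PySem.Str.startswith l "|--") l = true := hc
        simp only [pvColumns, List.filter_cons, hc', if_true, List.map_cons]
        simp
      · have hstep : pvAStep' (d.insert name cols, some name) l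
            = (d.insert name cols, some name) := by
          simp only [pvAStep', hl, Bool.false_eq_true, if_false]
          rw [if_neg (by tauto)]
        rw [hstep, ih hrest]
        simp only [Bool.not_eq_true] at hc
        have hc' : (fun l => PySem.Str.startswith l "|--") l = false := hc
        simp only [pvColumns, List.filter_cons, hc', Bool.false_eq_true, if_false]

-- with current table "" (falsy in Python) a header-free section changes nothing
theorem pvSection_fold_empty (sect : List String) (hs : ∀ l ∈ sect, pvIsHeader l = false)
    (d : PySem.Dict String (List String)) :
    sect.foldl pvAStep' (d, some "") = (d, some "") := by
  induction sect with
  | nil => rfl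
  | cons l rest ih =>
      have hl : PySem.Str.startswith l "DISCOVERING TABLE:" = false := hs l (by simp)
      have hstep : pvAStep' (d, some "") l = (d, some "") := by
        simp only [pvAStep', hl, Bool.false_eq_true, if_false]
        rw [if_neg (by tauto)]
      rw [List.foldl_cons, hstep, ih (fun x hx => hs x (by simp [hx]))]

-- when the next line is a header, A's step ignores the current-table component
theorem pvFold_header_head (h : String) (t : List String) (hh : pvIsHeader h = true)
    (d : PySem.Dict String (List String)) (c c' : Option String) :
    (h :: t).foldl pvAStep' (d, c) = (h :: t).foldl pvAStep' (d, c') := by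
  have hh' : PySem.Str.startswith h "DISCOVERING TABLE:" = true := hh
  simp only [List.foldl_cons, pvAStep', hh', if_true]

-- the D-scan through a header-free section: with state b it fires iff b and a '|--' line occurs
theorem pvDScan_section (sect : List String) (hs : ∀ l ∈ sect, pvIsHeader l = false) :
    ∀ (b : Bool) (r : List String),
      pvDScan (sect ++ r) b
        = ((b && sect.any (fun l => PySem.Chars.startswith l.toList ['|', '-', '-'])) || pvDScan r b) := by
  induction sect with
  | nil => intro b r; simp
  | cons l rest ih =>
      intro b r
      have hl : pvIsHeader l = false := hs l (by simp)
      have hrest : ∀ x ∈ rest, pvIsHeader x = false := fun x hx => hs x (by simp [hx])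
      have hl' : PySem.Str.startswith l "DISCOVERING TABLE:" = false := hl
      simp only [List.cons_append, pvDScan, hl', Bool.false_eq_true, if_false]
      cases hb : b with
      | false => simpa using ih hrest false r
      | true =>
          cases hw : PySem.Chars.startswith l.toList ['|', '-', '-'] with
          | true => simp [PySem.Str.startswith, hw]
          | false => simp [PySem.Str.startswith, hw, ih hrest true r]

-- the D-scan's state is reset by a header and irrelevant on [] (used to normalise rest')
theorem pvDScan_reset (ls : List String)
    (h : ls = [] ∨ ∃ h' t', ls = h' :: t' ∧ pvIsHeader h' = true) (b b' : Bool) :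
    pvDScan ls b = pvDScan ls b' := by
  rcases h with rfl | ⟨h', t', rfl, hh⟩
  · rfl
  · have hh' : PySem.Str.startswith h' "DISCOVERING TABLE:" = true := hh
    simp only [pvDScan, hh', if_true]

-- a section with no '|--' lines contributes no columns
theorem pvColumns_nil (sect : List String)
    (h : ∀ l ∈ sect, PySem.Chars.startswith l.toList ['|', '-', '-'] = false) :
    pvColumns sect = [] := by
  simp only [pvColumns, List.map_eq_nil_iff, List.filter_eq_nil_iff, Bool.not_eq_true]
  intro l hl; exact h l hl

-- main invariant: outside D_, A's fold from (d, None) computes B's section recursion from d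
theorem pvMainAux (n : Nat) : ∀ ls : List String, ls.length ≤ n →
    pvDScan ls false = false →
    ∀ d : PySem.Dict String (List String), (ls.foldl pvAStep' (d, none)).1 = pvBGo d ls := by
  induction n with
  | zero =>
      intro ls hlen _ d
      have : ls = [] := List.eq_nil_of_length_eq_zero (Nat.le_zero.mp hlen)
      subst this
      rw [pvBGo]
      rfl
  | succ n ihn =>
      intro ls hlen hD d
      cases ls with
      | nil => rw [pvBGo]; rfl
      | cons head rest =>
          by_cases hh : pvIsHeader head = true
          · -- header line: A opens a new entry; B inserts the whole section at once
            rw [pvBGo, if_pos hh]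
            show _ = pvBGo (d.insert (pvNameOf head) (pvColumns (pvSplitSection rest).1))
                ((pvSplitSection rest).2)
            have hh' : PySem.Str.startswith head "DISCOVERING TABLE:" = true := hh
            have hstep : pvAStep' (d, none) head
                = (d.insert (pvNameOf head) [], some (pvNameOf head)) := by
              simp only [pvAStep', hh', if_true]
            have hsec : ∀ l ∈ (pvSplitSection rest).1, pvIsHeader l = false := by
              intro l hl
              simp only [pvSplitSection] at hl
              have := List.mem_takeWhile_imp hl
              simpa using this
            have hsplit : (pvSplitSection rest).1 ++ (pvSplitSection rest).2 = rest := by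
              simp only [pvSplitSection]
              exact List.takeWhile_append_dropWhile
            have hlen' : (pvSplitSection rest).2.length ≤ n := by
              simp only [pvSplitSection]
              have := (List.dropWhile_sublist (l := rest)
                (p := fun l => !pvIsHeader l)).length_le
              simp only [List.length_cons] at hlen
              omega
            have hhead : (pvSplitSection rest).2 = [] ∨
                ∃ h t, (pvSplitSection rest).2 = h :: t ∧ pvIsHeader h = true := by
              cases hr : (pvSplitSection rest).2 with
              | nil => exact Or.inl rfl
              | cons h t =>
                  refine Or.inr ⟨h, t, rfl, ?_⟩
                  have hd := List.head?_dropWhile_not (fun l => !pvIsHeader l) rest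
                  simp only [pvSplitSection] at hr
                  rw [hr] at hd
                  simpa using hd
            -- propagate the no-D hypothesis through the section
            have hDrest : pvDScan rest (pvNameOf head == "") = false := by
              have : pvDScan (head :: rest) false = pvDScan rest (pvNameOf head == "") := by
                simp only [pvDScan, hh', if_true]
              rw [← this]; exact hD
            rw [← hsplit] at hDrest
            rw [pvDScan_section _ hsec] at hDrest
            have hDrest' : pvDScan (pvSplitSection rest).2 false = false := by
              rw [pvDScan_reset _ hhead false (pvNameOf head == "")]
              exact (Bool.or_eq_false_iff.mp hDrest).2
            rw [List.foldl_cons, hstep]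
            conv_lhs => rw [← hsplit, List.foldl_append]
            by_cases hn : pvNameOf head = ""
            · -- empty name: ¬D guarantees the section has no column lines
              have hbn : (pvNameOf head == "") = true := by simp [hn]
              rw [hbn] at hDrest
              have hnocol : ∀ l ∈ (pvSplitSection rest).1,
                  PySem.Chars.startswith l.toList ['|', '-', '-'] = false := by
                have := (Bool.or_eq_false_iff.mp hDrest).1
                simp only [Bool.true_and, List.any_eq_false] at this
                intro l hl; simpa using this l hl
              rw [hn, pvSection_fold_empty _ hsec, pvColumns_nil _ hnocol]
              rcases hhead with hnil | ⟨h, t, hht, hph⟩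
              · rw [hnil, List.foldl_nil, pvBGo]
              · rw [hht, pvFold_header_head h t hph _ (some "") none, ← hht]
                exact ihn _ hlen' hDrest' _
            · rw [pvSection_fold _ hsec d _ hn [], List.nil_append]
              rcases hhead with hnil | ⟨h, t, hht, hph⟩
              · rw [hnil, List.foldl_nil, pvBGo]
              · rw [hht, pvFold_header_head h t hph _ (some (pvNameOf head)) none, ← hht]
                exact ihn _ hlen' hDrest' _
          · -- non-header line with no current table: both sides skip it
            rw [pvBGo, if_neg hh]
            simp only [Bool.not_eq_true] at hh
            have hstep : pvAStep' (d, none) head = (d, none) := by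
              simp only [pvAStep']
              rw [if_neg (by simp only [Bool.not_eq_true]; exact hh)]
            have hDrest : pvDScan rest false = false := by
              have : pvDScan (head :: rest) false = pvDScan rest false := by
                have hh2 : PySem.Str.startswith head "DISCOVERING TABLE:" = false := hh
                simp only [pvDScan, hh2, Bool.false_eq_true, if_false, Bool.false_and]
              rw [← this]; exact hD
            rw [List.foldl_cons, hstep]
            simp only [List.length_cons] at hlen
            exact ihn rest (by omega) hDrest d

-- ===== VERDICT (by name: the statement is the Claim_ definition above) =====
theorem parse_bronze_profiling_spec : Claim_equal_parse_bronze_profiling := by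
  intro md _ hpre
  unfold Spec_parse_bronze_profiling parse_bronze_profiling parse_bronze_profiling_alt
  have hfun : (fun st raw => pvAStep' st (PySem.Str.strip raw)) = pvAStep := by
    funext st raw; rfl
  have hD : pvDScan ((PySem.Str.splitlines md).map PySem.Str.strip) false = false :=
    pvScan_noEmpty _ hpre
  rw [← pvMainAux _ _ (Nat.le_refl _) hD, List.foldl_map, hfun]
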